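-- pv_equiv track=rewrite | github.com/FrancescoRomeo02/UniversityNotes | [01]LT_21-22/SEM2/ASD/Exercises/D&I/prova.py | calcolatore
-- ===== SOURCE A (Python) =====
-- def calcolatore(a,i,f):
--     if(f<=i):
--         return -1
--     elif(i==f-1):
--         return a[i]*a[f]
--     else:
--         m = (i+f)//2
--         rl = calcolatore(a,i,m)
--         rr = calcolatore(a,m,f)
--         rt = rl+rr
--     return rt
-- ===== SOURCE B (Python) =====
-- def calcolatore(a, i, f):
--     if f <= i:
--         return -1
--     total = 0
--     for k in range(i, f):
--         total += a[k] * a[k + 1]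
--     return total
-- ===== Notes on version B (the rewrite author's own statement) =====
-- stated objective: simpler
-- what changed: Replaces the divide-and-conquer interval recursion (midpoint split, two recursive calls) with a single flat left-to-right loop accumulating a[k]*a[k+1] for k in range(i, f).
import Mathlib
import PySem

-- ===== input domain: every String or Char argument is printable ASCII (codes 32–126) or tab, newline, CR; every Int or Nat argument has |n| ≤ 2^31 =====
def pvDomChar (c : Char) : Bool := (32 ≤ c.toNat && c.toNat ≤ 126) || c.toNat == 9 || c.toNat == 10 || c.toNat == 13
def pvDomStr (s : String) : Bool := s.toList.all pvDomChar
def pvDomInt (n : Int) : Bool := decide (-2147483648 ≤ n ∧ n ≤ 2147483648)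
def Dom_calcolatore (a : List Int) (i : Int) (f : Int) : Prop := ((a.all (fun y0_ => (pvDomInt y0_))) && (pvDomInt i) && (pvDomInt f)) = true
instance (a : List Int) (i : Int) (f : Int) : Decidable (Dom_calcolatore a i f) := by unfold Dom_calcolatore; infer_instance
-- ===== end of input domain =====

-- B replaces A's divide-and-conquer interval recursion with one flat loop summing a[k]*a[k+1]; objective: simpler.

-- ===== PORT A =====
-- literal transliteration of A's recursion; a[x] is pyGetD (Pre_ excludes IndexError inputs)
def calcolatore (a : List Int) (i : Int) (f : Int) : Int :=
  if f ≤ i then -1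
  else if i = f - 1 then PySem.List.pyGetD a i 0 * PySem.List.pyGetD a f 0
  else
    let m := PySem.Int.floordiv (i + f) 2
    let rl := calcolatore a i m
    let rr := calcolatore a m f
    rl + rr
termination_by (f - i).toNat
decreasing_by
  all_goals
    rw [PySem.Int.floordiv_eq_ediv_of_pos (by omega : (0:Int) < 2)]
    omega

-- ===== PORT B =====
-- literal transliteration of Source B: 'for k in range(i, f): total += a[k]*a[k+1]'
def calcolatore_alt (a : List Int) (i : Int) (f : Int) : Int :=
  if f ≤ i then -1
  else (PySem.List.pyRange i f 1).foldl
    (fun total k => total + PySem.List.pyGetD a k 0 * PySem.List.pyGetD a (k + 1) 0) 0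

-- ===== PRECONDITION & SPEC =====
-- Pre_ excludes exactly the inputs where Python A (and B alike) raises IndexError:
-- when f > i the indices i..f must all be valid (negative Python indices wrap, so ≥ -len and < len).
def Pre_calcolatore (a : List Int) (i : Int) (f : Int) : Prop :=
  f ≤ i ∨ (-(a.length : Int) ≤ i ∧ f < (a.length : Int))
instance (a : List Int) (i : Int) (f : Int) : Decidable (Pre_calcolatore a i f) := by
  unfold Pre_calcolatore; infer_instance

def pvWitness_calcolatore : List Int × Int × Int := ([2, 3, 5, 7], 0, 3)

def Spec_calcolatore (a : List Int) (i : Int) (f : Int) (out : Int) : Prop := out = calcolatore_alt a i f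
instance (a : List Int) (i : Int) (f : Int) (out : Int) : Decidable (Spec_calcolatore a i f out) := by unfold Spec_calcolatore; infer_instance

-- ===== CLAIM (what is proved, stated in full; the proofs are below) =====
def Claim_equal_calcolatore : Prop := ∀ (a : List Int) (i : Int) (f : Int), Dom_calcolatore a i f → Pre_calcolatore a i f → Spec_calcolatore a i f (calcolatore a i f)

-- ===== LEMMAS AND PROOFS =====

-- the common value: sum of adjacent products over the integer range [i, f)
def pvSum (a : List Int) (i f : Int) : Int :=
  ((PySem.List.pyRange i f 1).map
    (fun k => PySem.List.pyGetD a k 0 * PySem.List.pyGetD a (k + 1) 0)).sum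

theorem pvSum_split (a : List Int) {i m f : Int} (h1 : i ≤ m) (h2 : m ≤ f) :
    pvSum a i f = pvSum a i m + pvSum a m f := by
  unfold pvSum
  rw [PySem.List.pyRange_one_append i m f h1 h2, List.map_append, List.sum_append]

theorem pvSum_single (a : List Int) (i : Int) :
    pvSum a i (i + 1) = PySem.List.pyGetD a i 0 * PySem.List.pyGetD a (i + 1) 0 := by
  unfold pvSum
  rw [PySem.List.pyRange_one_singleton]
  simp

theorem calcolatore_eq_pvSum (a : List Int) :
    ∀ (n : Nat) (i f : Int), (f - i).toNat = n → i < f → calcolatore a i f = pvSum a i f := by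
  intro n
  induction n using Nat.strong_induction_on with
  | _ n ih =>
    intro i f hn hif
    rw [calcolatore]
    rw [if_neg (by omega)]
    by_cases hb : i = f - 1
    · rw [if_pos hb]
      have : f = i + 1 := by omega
      subst this
      rw [pvSum_single]
    · rw [if_neg hb]
      generalize hm : PySem.Int.floordiv (i + f) 2 = m
      have h2 : m = (i + f) / 2 := by
        rw [← hm]; exact PySem.Int.floordiv_eq_ediv_of_pos (by omega)
      have hmb : i < m ∧ m < f := by omega
      show calcolatore a i m + calcolatore a m f = pvSum a i f
      rw [ih ((m - i).toNat) (by omega) i m rfl (by omega),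
          ih ((f - m).toNat) (by omega) m f rfl (by omega)]
      exact (pvSum_split a (by omega) (by omega)).symm

theorem calcolatore_alt_eq_pvSum (a : List Int) (i f : Int) (h : i < f) :
    calcolatore_alt a i f = pvSum a i f := by
  unfold calcolatore_alt pvSum
  rw [if_neg (by omega)]
  rw [PySem.List.foldl_add]
  simp

-- ===== VERDICT (by name: the statement is the Claim_ definition above) =====
theorem calcolatore_spec : Claim_equal_calcolatore := by
  intro a i f _ _
  unfold Spec_calcolatore
  by_cases h : f ≤ i
  · rw [calcolatore, calcolatore_alt, if_pos h, if_pos h]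
  · rw [calcolatore_eq_pvSum a ((f - i).toNat) i f rfl (by omega),
        calcolatore_alt_eq_pvSum a i f (by omega)]
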